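-- pv_equiv track=rewrite | github.com/saketdingliwal/Sentiment-Analyser | final.py | not_clear
-- ===== SOURCE A (Python) =====
-- negate_list = ["not","never","no"]
--
-- def not_clear(tokens):
--     i =0
--     for token in tokens:
--         if token in negate_list or token[-3:]=="n't":
--             if i+1 < len(tokens):
--                 tokens[i+1] =  tokens[i+1] + "_NEG"
--             if i+2 < len(tokens):
--                 tokens[i+2] = tokens[i+2] + "_NEG"
--         i+=1
--     return tokens
-- ===== SOURCE B (Python) =====
-- negate_list = ["not","never","no"]
--
-- def not_clear(tokens):
--     # single forward pass with a countdown of positions still to mark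
--     remaining = 0
--     for j in range(len(tokens)):
--         if remaining > 0:
--             tokens[j] = tokens[j] + "_NEG"
--             remaining -= 1
--         if tokens[j] in negate_list or tokens[j][-3:] == "n't":
--             remaining = 2
--     return tokens
-- ===== Notes on version B (the rewrite author's own statement) =====
-- stated objective: alternative
-- what changed: Replaces A's look-ahead writes to positions i+1 and i+2 (with bounds checks) by a single forward pass maintaining an integer countdown 'remaining' of positions still to mark, appending '_NEG' at the current position when the countdown is live.
import Mathlib
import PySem

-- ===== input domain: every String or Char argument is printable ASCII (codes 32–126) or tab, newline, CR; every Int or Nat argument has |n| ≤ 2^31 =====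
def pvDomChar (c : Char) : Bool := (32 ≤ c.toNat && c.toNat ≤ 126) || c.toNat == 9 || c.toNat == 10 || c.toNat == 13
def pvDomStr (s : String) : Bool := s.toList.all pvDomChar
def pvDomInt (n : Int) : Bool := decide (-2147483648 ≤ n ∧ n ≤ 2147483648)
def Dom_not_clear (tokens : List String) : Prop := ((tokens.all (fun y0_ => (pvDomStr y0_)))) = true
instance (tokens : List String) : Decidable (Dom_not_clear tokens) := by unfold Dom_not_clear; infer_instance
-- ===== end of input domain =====

-- B does one forward pass with a countdown state instead of A's look-ahead writes to i+1/i+2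
-- (objective: alternative decomposition; equivalence is about the RETURN value — both Pythons
-- mutate the argument list in place).

def negate_list : List String := ["not", "never", "no"]

-- `token in negate_list or token[-3:] == "n't"` (shared by both sources verbatim)
def pvTrigger (token : String) : Bool :=
  negate_list.contains token || (PySem.Str.slice token (some (-3)) none == "n't")

-- ===== PORT A =====
-- the body of A's `if`: conditional writes to positions i+1 and i+2
def notClearMark (tokens : List String) (i : Nat) : List String :=
  let t1 := if i + 1 < tokens.length
            then tokens.set (i + 1) (tokens.getD (i + 1) "" ++ "_NEG") else tokens
  if i + 2 < t1.length then t1.set (i + 2) (t1.getD (i + 2) "" ++ "_NEG") else t1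

-- (cited by the loop's termination proof)
lemma length_notClearMark (l : List String) (j : Nat) : (notClearMark l j).length = l.length := by
  unfold notClearMark
  split <;> (dsimp only []; split <;> simp)

-- A's `for token in tokens` with live mutation: index loop reading the current list state
def notClearLoop (tokens : List String) (i : Nat) : List String :=
  if h : i < tokens.length then
    notClearLoop (if pvTrigger (tokens.getD i "") then notClearMark tokens i else tokens) (i + 1)
  else tokens
termination_by tokens.length - i
decreasing_by
  split
  · simp only [length_notClearMark]; omega
  · omega

def not_clear (tokens : List String) : List String := notClearLoop tokens 0

-- ===== PORT B =====
-- B's single pass: `remaining` counts positions still to be marked "_NEG"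
def notClearAltLoop : List String → Nat → List String
  | [], _ => []
  | t :: rest, remaining =>
    let t' := if 0 < remaining then t ++ "_NEG" else t
    let remaining' := if 0 < remaining then remaining - 1 else remaining
    t' :: notClearAltLoop rest (if pvTrigger t' then 2 else remaining')

def not_clear_alt (tokens : List String) : List String := notClearAltLoop tokens 0

-- ===== PRECONDITION & SPEC =====
def Spec_not_clear (tokens : List String) (out : List String) : Prop := out = not_clear_alt tokens
instance (tokens : List String) (out : List String) : Decidable (Spec_not_clear tokens out) := by unfold Spec_not_clear; infer_instance

-- ===== CLAIM (what is proved, stated in full; the proofs are below) =====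
def Claim_equal_not_clear : Prop := ∀ (tokens : List String), Dom_not_clear tokens → Spec_not_clear tokens (not_clear tokens)

-- ===== LEMMAS AND PROOFS =====

-- first `rem` elements already carry the pending "_NEG" marks
def applyNeg : Nat → List String → List String
  | _, [] => []
  | 0, l => l
  | r + 1, t :: rest => (t ++ "_NEG") :: applyNeg r rest

lemma applyNeg_zero (l : List String) : applyNeg 0 l = l := by
  cases l <;> rfl

lemma applyNeg_cons (rem : Nat) (t : String) (rest : List String) :
    applyNeg rem (t :: rest) =
      (if 0 < rem then t ++ "_NEG" else t) ::
        applyNeg (if 0 < rem then rem - 1 else rem) rest := by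
  cases rem with
  | zero => simp [applyNeg, applyNeg_zero]
  | succ r => simp [applyNeg]

lemma pvTrigger_append_NEG (s : String) : pvTrigger (s ++ "_NEG") = false := by
  have htl : (s ++ "_NEG").toList = s.toList ++ ['_', 'N', 'E', 'G'] := by
    rw [String.toList_append]; rfl
  have hne : ∀ w : String, w.toList.getLast? ≠ some 'G' → (s ++ "_NEG" == w) = false := by
    intro w hw
    apply beq_eq_false_iff_ne.mpr
    intro h
    apply hw
    rw [← h, htl, List.getLast?_append]
    rfl
  have hslice : (PySem.Str.slice (s ++ "_NEG") (some (-3)) none == "n't") = false := by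
    apply beq_eq_false_iff_ne.mpr
    intro h
    have h2 := congrArg String.toList h
    rw [show (PySem.Str.slice (s ++ "_NEG") (some (-3)) none).toList
          = PySem.List.slice (s ++ "_NEG").toList (some (-3)) none from by simp [pysem]] at h2
    rw [htl, PySem.List.slice_from_neg_ofNat _ 3 (by omega)] at h2
    have hlen : (s.toList ++ ['_', 'N', 'E', 'G']).length - 3 = (s.toList ++ ['_']).length := by
      simp
    rw [hlen, show s.toList ++ ['_', 'N', 'E', 'G'] = (s.toList ++ ['_']) ++ ['N', 'E', 'G'] from by simp,
        List.drop_left] at h2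
    exact absurd h2 (by decide)
  simp only [pvTrigger, hslice, Bool.or_false, negate_list]
  simp only [List.contains_cons, List.contains_nil,
    hne "not" (by decide), hne "never" (by decide), hne "no" (by decide)]
  rfl

lemma getD_append_cons (pre : List String) (t : String) (l : List String) :
    (pre ++ t :: l).getD pre.length "" = t := by
  simp [List.getD]

lemma set_append_cons (pre : List String) (t v : String) (l : List String) :
    (pre ++ t :: l).set pre.length v = pre ++ v :: l := by
  simp

lemma notClearMark_eq (pre : List String) (t : String) (rest : List String) :
    notClearMark (pre ++ t :: rest) pre.length = pre ++ t :: applyNeg 2 rest := by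
  unfold notClearMark
  cases rest with
  | nil =>
    simp [applyNeg]
  | cons a rs =>
    cases rs with
    | nil =>
      have h1 : pre.length + 1 < (pre ++ t :: [a]).length := by simp
      have e1 : (pre ++ t :: [a]).set (pre.length + 1) ((pre ++ t :: [a]).getD (pre.length + 1) "" ++ "_NEG")
          = pre ++ t :: [a ++ "_NEG"] := by
        have : pre ++ t :: [a] = (pre ++ [t]) ++ a :: [] := by simp
        rw [this]
        rw [show pre.length + 1 = (pre ++ [t]).length from by simp]
        rw [getD_append_cons, set_append_cons]
        simp
      simp only [h1, if_pos, e1]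
      have h2 : ¬ (pre.length + 2 < (pre ++ t :: [a ++ "_NEG"]).length) := by simp
      simp only [h2, applyNeg]
      rfl
    | cons b rs' =>
      have e1 : (pre ++ t :: a :: b :: rs').set (pre.length + 1) ((pre ++ t :: a :: b :: rs').getD (pre.length + 1) "" ++ "_NEG")
          = pre ++ t :: (a ++ "_NEG") :: b :: rs' := by
        have : pre ++ t :: a :: b :: rs' = (pre ++ [t]) ++ a :: b :: rs' := by simp
        rw [this]
        rw [show pre.length + 1 = (pre ++ [t]).length from by simp]
        rw [getD_append_cons, set_append_cons]
        simp
      have h1 : pre.length + 1 < (pre ++ t :: a :: b :: rs').length := by simp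
      simp only [h1, if_pos, e1]
      have h2 : pre.length + 2 < (pre ++ t :: (a ++ "_NEG") :: b :: rs').length := by simp
      simp only [h2, if_pos]
      have e2 : (pre ++ t :: (a ++ "_NEG") :: b :: rs').set (pre.length + 2) ((pre ++ t :: (a ++ "_NEG") :: b :: rs').getD (pre.length + 2) "" ++ "_NEG")
          = pre ++ t :: (a ++ "_NEG") :: (b ++ "_NEG") :: rs' := by
        have : pre ++ t :: (a ++ "_NEG") :: b :: rs' = (pre ++ [t, a ++ "_NEG"]) ++ b :: rs' := by simp
        rw [this]
        rw [show pre.length + 2 = (pre ++ [t, a ++ "_NEG"]).length from by simp]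
        rw [getD_append_cons, set_append_cons]
        simp
      rw [e2]
      simp [applyNeg, applyNeg_zero]

lemma main_loop (suf : List String) : ∀ (pre : List String) (rem : Nat),
    notClearLoop (pre ++ applyNeg rem suf) pre.length = pre ++ notClearAltLoop suf rem := by
  induction suf with
  | nil =>
    intro pre rem
    rw [notClearLoop]
    simp [applyNeg, notClearAltLoop]
  | cons t rest ih =>
    intro pre rem
    rw [applyNeg_cons]
    set t' := if 0 < rem then t ++ "_NEG" else t with ht'
    set rem1 := if 0 < rem then rem - 1 else rem with hrem1
    rw [notClearLoop]
    have hlt : pre.length < (pre ++ t' :: applyNeg rem1 rest).length := by simp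
    rw [dif_pos hlt, getD_append_cons]
    by_cases htr : pvTrigger t' = true
    · -- trigger fires; then rem = 0 (a marked token never triggers)
      have hrem0 : rem = 0 := by
        by_contra h
        have hf : pvTrigger t' = false := by
          rw [ht', if_pos (Nat.pos_of_ne_zero h)]
          exact pvTrigger_append_NEG t
        rw [htr] at hf; exact absurd hf (by decide)
      subst hrem0
      simp only [if_neg (Nat.lt_irrefl 0)] at ht' hrem1
      rw [htr, if_pos rfl]
      rw [ht', hrem1, applyNeg_zero, notClearMark_eq]
      have hrw : pre ++ t :: applyNeg 2 rest = (pre ++ [t]) ++ applyNeg 2 rest := by simp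
      have hlen : pre.length + 1 = (pre ++ [t]).length := by simp
      rw [hrw, hlen, ih (pre ++ [t]) 2]
      rw [notClearAltLoop]
      rw [ht'] at htr
      simp [htr]
    · rw [if_neg htr]
      have hrw : pre ++ t' :: applyNeg rem1 rest = (pre ++ [t']) ++ applyNeg rem1 rest := by simp
      have hlen : pre.length + 1 = (pre ++ [t']).length := by simp
      rw [hrw, hlen, ih (pre ++ [t']) rem1]
      rw [notClearAltLoop]
      simp only [Bool.not_eq_true] at htr
      simp [← ht', ← hrem1, htr]

-- ===== VERDICT (by name: the statement is the Claim_ definition above) =====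
theorem not_clear_spec : Claim_equal_not_clear := by
  intro tokens _
  unfold Spec_not_clear not_clear not_clear_alt
  have := main_loop tokens [] 0
  simpa [applyNeg_zero] using this
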